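-- pv_equiv track=rewrite | github.com/EdisonChendi/leetcodeshuashuashua | meiriyiti/cn/1020_number_of_enclaves.py | numEnclaves
-- ===== SOURCE A (Python) =====
-- from typing import List
--
-- def numEnclaves(grid: List[List[int]]) -> int:
--     def dfs(i, j):
--         if 0 <= i < H and 0 <= j < W and grid[i][j] == 1:
--             grid[i][j] = 0
--             for ni, nj in ((i+1, j), (i-1, j), (i, j+1), (i, j-1)):
--                 dfs(ni, nj)
--
--     def borders():
--         for i in [0, H-1]:
--             for j in range(W):
--                 yield (i, j)
--
--         for i in range(1, H-1):
--             for j in [0, W-1]: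
--                 yield (i, j)
--
--     H, W = len(grid), len(grid[0])
--     for i, j in borders():
--         dfs(i, j)
--
--     return sum(grid[i][j] == 1 for i in range(H) for j in range(W))
-- ===== SOURCE B (Python) =====
-- from typing import List
--
-- def numEnclaves(grid: List[List[int]]) -> int:
--     # Iterative flood fill with an explicit stack instead of recursion.
--     # Mutates grid in place, like the original.
--     H, W = len(grid), len(grid[0])
--     border = [(i, j) for i in (0, H - 1) for j in range(W)] + \
--              [(i, j) for i in range(1, H - 1) for j in (0, W - 1)]
--     stack = border[::-1]
--     while stack:
--         i, j = stack.pop()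
--         if 0 <= i < H and 0 <= j < W and grid[i][j] == 1:
--             grid[i][j] = 0
--             stack.append((i, j - 1))
--             stack.append((i, j + 1))
--             stack.append((i - 1, j))
--             stack.append((i + 1, j))
--     return sum(row[j] == 1 for row in grid for j in range(W))
-- ===== Notes on version B (the rewrite author's own statement) =====
-- stated objective: alternative
-- what changed: Replaces the recursive DFS flood fill with an iterative explicit-stack flood fill seeded with all border cells at once, and sums the remaining ones by iterating rows directly instead of indexing.
import Mathlib
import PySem

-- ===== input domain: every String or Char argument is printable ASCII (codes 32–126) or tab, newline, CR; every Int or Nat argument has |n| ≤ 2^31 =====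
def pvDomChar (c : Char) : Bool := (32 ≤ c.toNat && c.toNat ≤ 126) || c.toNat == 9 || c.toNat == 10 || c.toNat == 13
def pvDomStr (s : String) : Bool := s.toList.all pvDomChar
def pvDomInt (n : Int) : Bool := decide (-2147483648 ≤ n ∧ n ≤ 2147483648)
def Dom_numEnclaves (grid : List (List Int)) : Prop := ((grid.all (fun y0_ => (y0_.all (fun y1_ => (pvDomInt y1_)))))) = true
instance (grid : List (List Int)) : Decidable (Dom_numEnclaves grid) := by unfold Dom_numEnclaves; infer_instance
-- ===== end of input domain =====

-- B replaces A's recursive DFS flood fill by an iterative explicit-stack flood fill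
-- (alternative decomposition, same cost). Both Pythons mutate `grid` in place; the
-- equivalence proved here is about the return value.

-- ===== PORT A =====
-- Shared cell helpers: indices are only used after the guards 0 ≤ i and 0 ≤ j, so
-- `.toNat` is exact here (no negative-index wraparound can be reached).
def pvGetCell (g : List (List Int)) (i j : Int) : Int :=
  (g.getD i.toNat []).getD j.toNat 0

def pvSetCell (g : List (List Int)) (i j : Int) : List (List Int) :=
  g.set i.toNat ((g.getD i.toNat []).set j.toNat 0)

-- number of 1-cells, the termination measure of the flood fill
def pvCount1 (r : List Int) : Nat := r.count 1
def pvOnes (g : List (List Int)) : Nat := (g.map pvCount1).sum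

-- A's `dfs`, with fuel for termination; A's recursion clears a 1-cell before every
-- nested call, so the fuel `pvOnes grid + 1` passed below never runs out (lemmas below).
def pvDfsA (f : Nat) (H W : Int) (g : List (List Int)) (i j : Int) : List (List Int) :=
  match f with
  | 0 => g
  | f + 1 =>
    if 0 ≤ i ∧ i < H ∧ 0 ≤ j ∧ j < W ∧ pvGetCell g i j = 1 then
      [(i+1,j), (i-1,j), (i,j+1), (i,j-1)].foldl
        (fun h p => pvDfsA f H W h p.1 p.2) (pvSetCell g i j)
    else g

-- A's `borders()` generator, as the list it yields
def pvBordersA (H W : Int) : List (Int × Int) :=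
  (([0, H-1] : List Int).flatMap fun i => (PySem.List.pyRange 0 W 1).map fun j => (i, j)) ++
  ((PySem.List.pyRange 1 (H-1) 1).flatMap fun i => ([0, W-1] : List Int).map fun j => (i, j))

def numEnclaves (grid : List (List Int)) : Int :=
  let H : Int := grid.length
  let W : Int := (grid.headD []).length
  let g := (pvBordersA H W).foldl (fun g p => pvDfsA (pvOnes grid + 1) H W g p.1 p.2) grid
  (PySem.List.pyRange 0 H 1).foldl (fun acc i =>
    (PySem.List.pyRange 0 W 1).foldl (fun acc j =>
      acc + if pvGetCell g i j = 1 then 1 else 0) acc) 0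

-- ===== PORT B =====
-- termination facts for B's while-loop (the loop clears one 1-cell per push round)
theorem pvGetD_one_lt_length (r : List Int) (n : Nat) (h : r.getD n 0 = 1) : n < r.length := by
  by_contra hn
  rw [List.getD_eq_getElem?_getD, List.getElem?_eq_none (by omega)] at h
  simp at h

theorem pvCount1_set_lt (r : List Int) (n : Nat) (h : r.getD n 0 = 1) :
    pvCount1 (r.set n 0) < pvCount1 r := by
  induction r generalizing n with
  | nil => simp [List.getD] at h
  | cons a t ih =>
    cases n with
    | zero =>
      simp [List.getD] at h
      simp [pvCount1, h]
    | succ n =>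
      have h' : t.getD n 0 = 1 := by simpa [List.getD] using h
      have := ih n h'
      simp [pvCount1, List.count_cons] at *
      omega

theorem pvSum_set_nat (l : List Nat) (k : Nat) (x : Nat) (hk : k < l.length) :
    (l.set k x).sum + l[k] = l.sum + x := by
  induction l generalizing k with
  | nil => simp at hk
  | cons a t ih =>
    cases k with
    | zero => simp [List.sum_cons]; omega
    | succ k =>
      have hk' : k < t.length := by simpa using hk
      have := ih k hk'
      simp [List.sum_cons] at *
      omega

theorem pvOnes_set_lt (g : List (List Int)) (i j : Int) (h : pvGetCell g i j = 1) :
    pvOnes (pvSetCell g i j) < pvOnes g := by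
  unfold pvGetCell at h
  have hrow : j.toNat < (g.getD i.toNat []).length := pvGetD_one_lt_length _ _ h
  have hi : i.toNat < g.length := by
    by_contra hn
    have he : g.getD i.toNat [] = [] := by
      rw [List.getD_eq_getElem?_getD, List.getElem?_eq_none (by omega)]
      rfl
    rw [he] at hrow
    simp at hrow
  unfold pvOnes pvSetCell
  rw [List.map_set]
  have hmap : i.toNat < (g.map pvCount1).length := by simpa using hi
  have hs := pvSum_set_nat (g.map pvCount1) i.toNat (pvCount1 ((g.getD i.toNat []).set j.toNat 0)) hmap
  have hget : (g.map pvCount1)[i.toNat] = pvCount1 (g.getD i.toNat []) := by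
    rw [List.getElem_map]
    congr 1
    rw [List.getD_eq_getElem?_getD, List.getElem?_eq_getElem hi]
    rfl
  have hlt := pvCount1_set_lt (g.getD i.toNat []) j.toNat h
  rw [hget] at hs
  omega

-- The Python stack pops from its END; we keep the TOP of the stack at the head of the
-- Lean list.  Hence `stack = border[::-1]` + pop() delivers the border cells in order,
-- so the Lean stack starts as the border list itself, and the four appends
-- (i,j-1),(i,j+1),(i-1,j),(i+1,j) become conses in reverse push order.
def pvLoopB (H W : Int) (g : List (List Int)) (stack : List (Int × Int)) : List (List Int) :=
  match stack with
  | [] => g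
  | (i, j) :: rest =>
    if h : 0 ≤ i ∧ i < H ∧ 0 ≤ j ∧ j < W ∧ pvGetCell g i j = 1 then
      pvLoopB H W (pvSetCell g i j) ((i+1,j) :: (i-1,j) :: (i,j+1) :: (i,j-1) :: rest)
    else
      pvLoopB H W g rest
termination_by 5 * pvOnes g + stack.length
decreasing_by
  · have := pvOnes_set_lt g i j h.2.2.2.2
    simp only [List.length_cons]
    omega
  · simp only [List.length_cons]
    omega

-- B's `border` comprehension
def pvBorderB (H W : Int) : List (Int × Int) :=
  (([0, H-1] : List Int).flatMap fun i => (PySem.List.pyRange 0 W 1).map fun j => (i, j)) ++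
  ((PySem.List.pyRange 1 (H-1) 1).flatMap fun i => ([0, W-1] : List Int).map fun j => (i, j))

def numEnclaves_alt (grid : List (List Int)) : Int :=
  let H : Int := grid.length
  let W : Int := (grid.headD []).length
  let g := pvLoopB H W grid (pvBorderB H W)
  g.foldl (fun acc row =>
    (PySem.List.pyRange 0 W 1).foldl (fun acc j =>
      acc + if row.getD j.toNat 0 = 1 then 1 else 0) acc) 0

-- ===== PRECONDITION & SPEC =====
-- Python A raises IndexError on `grid[0]` when the grid is empty and on `grid[i][j]`
-- (in dfs or in the final sum) when some row is shorter than the first row; exactly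
-- those inputs are excluded.
def Pre_numEnclaves (grid : List (List Int)) : Prop :=
  grid ≠ [] ∧ ∀ row ∈ grid, (grid.headD []).length ≤ row.length
instance (grid : List (List Int)) : Decidable (Pre_numEnclaves grid) := by
  unfold Pre_numEnclaves; infer_instance

def pvWitness_numEnclaves : List (List Int) := [[1, 0], [0, 1]]

def Spec_numEnclaves (grid : List (List Int)) (out : Int) : Prop := out = numEnclaves_alt grid
instance (grid : List (List Int)) (out : Int) : Decidable (Spec_numEnclaves grid out) := by
  unfold Spec_numEnclaves; infer_instance

-- ===== CLAIM (what is proved, stated in full; the proofs are below) =====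
def Claim_equal_numEnclaves : Prop := ∀ (grid : List (List Int)),
  Dom_numEnclaves grid → Pre_numEnclaves grid → Spec_numEnclaves grid (numEnclaves grid)

-- ===== LEMMAS AND PROOFS =====

theorem pvDfsA_ones_le (f : Nat) (H W : Int) :
    ∀ (g : List (List Int)) (i j : Int), pvOnes (pvDfsA f H W g i j) ≤ pvOnes g := by
  induction f with
  | zero => intro g i j; simp [pvDfsA]
  | succ f ih =>
    intro g i j
    rw [pvDfsA]
    split
    · next hg =>
      simp only [List.foldl_cons, List.foldl_nil]
      have h1 := pvOnes_set_lt g i j hg.2.2.2.2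
      exact le_trans (ih _ _ _) (le_trans (ih _ _ _) (le_trans (ih _ _ _)
        (le_trans (ih _ _ _) (Nat.le_of_lt h1))))
    · exact le_refl _

theorem pvLoop_cons_eq (H W : Int) :
    ∀ (f : Nat) (g : List (List Int)) (i j : Int) (st : List (Int × Int)),
      pvOnes g < f →
      pvLoopB H W g ((i,j) :: st) = pvLoopB H W (pvDfsA f H W g i j) st := by
  intro f
  induction f with
  | zero => intro g i j st h; omega
  | succ f ih =>
    intro g i j st h
    rw [pvLoopB, pvDfsA]
    by_cases hg : 0 ≤ i ∧ i < H ∧ 0 ≤ j ∧ j < W ∧ pvGetCell g i j = 1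
    · rw [dif_pos hg, if_pos hg]
      simp only [List.foldl_cons, List.foldl_nil]
      have h1 : pvOnes (pvSetCell g i j) < f := by
        have := pvOnes_set_lt g i j hg.2.2.2.2; omega
      rw [ih _ _ _ _ h1]
      rw [ih _ _ _ _ (lt_of_le_of_lt (pvDfsA_ones_le f H W _ _ _) h1)]
      rw [ih _ _ _ _ (lt_of_le_of_lt (le_trans (pvDfsA_ones_le f H W _ _ _)
            (pvDfsA_ones_le f H W _ _ _)) h1)]
      rw [ih _ _ _ _ (lt_of_le_of_lt (le_trans (pvDfsA_ones_le f H W _ _ _)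
            (le_trans (pvDfsA_ones_le f H W _ _ _) (pvDfsA_ones_le f H W _ _ _))) h1)]
    · rw [dif_neg hg, if_neg hg]

theorem pvLoop_eq_fold (H W : Int) (f : Nat) :
    ∀ (bs : List (Int × Int)) (g : List (List Int)), pvOnes g < f →
      pvLoopB H W g bs = bs.foldl (fun g p => pvDfsA f H W g p.1 p.2) g := by
  intro bs
  induction bs with
  | nil => intro g h; rw [pvLoopB]; rfl
  | cons p bs ih =>
    intro g h
    obtain ⟨i, j⟩ := p
    rw [pvLoop_cons_eq H W f g i j bs h, List.foldl_cons]
    exact ih _ (lt_of_le_of_lt (pvDfsA_ones_le f H W g i j) h)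

theorem pvSetCell_length (g : List (List Int)) (i j : Int) :
    (pvSetCell g i j).length = g.length := by
  simp [pvSetCell]

theorem pvDfsA_length (f : Nat) (H W : Int) :
    ∀ (g : List (List Int)) (i j : Int), (pvDfsA f H W g i j).length = g.length := by
  induction f with
  | zero => intro g i j; simp [pvDfsA]
  | succ f ih =>
    intro g i j
    rw [pvDfsA]
    split
    · simp only [List.foldl_cons, List.foldl_nil]
      rw [ih, ih, ih, ih, pvSetCell_length]
    · rfl

theorem pvFold_length (f : Nat) (H W : Int) (bs : List (Int × Int)) :
    ∀ (g : List (List Int)),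
      (bs.foldl (fun g p => pvDfsA f H W g p.1 p.2) g).length = g.length := by
  induction bs with
  | nil => intro g; rfl
  | cons p bs ih =>
    intro g
    rw [List.foldl_cons, ih, pvDfsA_length]

theorem pvGetD_nonneg (xs : List (List Int)) (i : Int) (hi : 0 ≤ i) :
    PySem.List.pyGetD xs i [] = xs.getD i.toNat [] := by
  obtain ⟨n, rfl⟩ : ∃ n : Nat, i = (n : Int) := ⟨i.toNat, (Int.toNat_of_nonneg hi).symm⟩
  simp

theorem pvCount_eq (W : Int) (g : List (List Int)) :
    (PySem.List.pyRange 0 (g.length : Int) 1).foldl (fun acc i =>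
      (PySem.List.pyRange 0 W 1).foldl (fun acc j =>
        acc + if pvGetCell g i j = 1 then 1 else 0) acc) (0 : Int)
    = g.foldl (fun acc row =>
      (PySem.List.pyRange 0 W 1).foldl (fun acc j =>
        acc + if row.getD j.toNat 0 = 1 then 1 else 0) acc) (0 : Int) := by
  rw [← PySem.List.foldl_pyRange_zero_pyGetD' g []
        (fun acc row => (PySem.List.pyRange 0 W 1).foldl (fun acc j =>
          acc + if row.getD j.toNat 0 = 1 then 1 else 0) acc) 0]
  apply PySem.List.foldl_congr_mem
  intro acc i hi
  have h0 : 0 ≤ i := by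
    have := (PySem.List.mem_pyRange_one).1 hi
    omega
  simp only [pvGetCell, pvGetD_nonneg g i h0]
  rfl

-- ===== VERDICT (by name: the statement is the Claim_ definition above) =====
theorem numEnclaves_spec : Claim_equal_numEnclaves := by
  intro grid _ _
  unfold Spec_numEnclaves numEnclaves numEnclaves_alt
  simp only []
  have hb : pvBorderB (grid.length : Int) ((grid.headD []).length : Int)
      = pvBordersA (grid.length : Int) ((grid.headD []).length : Int) := rfl
  rw [hb]
  rw [pvLoop_eq_fold _ _ (pvOnes grid + 1) _ grid (Nat.lt_succ_self _)]
  have hlen : ((pvBordersA (grid.length : Int) ((grid.headD []).length : Int)).foldl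
      (fun g p => pvDfsA (pvOnes grid + 1) (grid.length : Int) ((grid.headD []).length : Int) g p.1 p.2)
      grid).length = grid.length := pvFold_length _ _ _ _ _
  rw [← pvCount_eq]
  rw [hlen]
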